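-- pv_equiv track=rewrite | github.com/byeongal/BaekjoonOnlineJudge | Gold V/2225.py | solution
-- ===== SOURCE A (Python) =====
-- from typing import List
--
-- def solution(n: int, k: int) -> int:
--     dp: List[List[int]] = [[0 for col in range(n + 1)] for row in range(k + 1)]
--     for i in range(0, n + 1):
--         dp[1][i] = 1
--     for i in range(1, k + 1):
--         for j in range(0, n+1):
--             for _k in range(j + 1):
--                 dp[i][j] += dp[i-1][j-_k]
--                 dp[i][j] %= 1000000000
--     return dp[k][n]
-- ===== SOURCE B (Python) =====
-- def solution(n: int, k: int) -> int:
--     MOD = 1000000000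
--     row = [1] * (n + 1)
--     for _ in range(k - 1):
--         acc = 0
--         new = []
--         for v in row:
--             acc = (acc + v) % MOD
--             new.append(acc)
--         row = new
--     return row[n]
-- ===== Notes on version B (the rewrite author's own statement) =====
-- stated objective: faster
-- what changed: Replaced the O(n) inner summation loop over all previous cells by a running prefix-sum over a single row, dropping the k x n matrix.
import Mathlib
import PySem

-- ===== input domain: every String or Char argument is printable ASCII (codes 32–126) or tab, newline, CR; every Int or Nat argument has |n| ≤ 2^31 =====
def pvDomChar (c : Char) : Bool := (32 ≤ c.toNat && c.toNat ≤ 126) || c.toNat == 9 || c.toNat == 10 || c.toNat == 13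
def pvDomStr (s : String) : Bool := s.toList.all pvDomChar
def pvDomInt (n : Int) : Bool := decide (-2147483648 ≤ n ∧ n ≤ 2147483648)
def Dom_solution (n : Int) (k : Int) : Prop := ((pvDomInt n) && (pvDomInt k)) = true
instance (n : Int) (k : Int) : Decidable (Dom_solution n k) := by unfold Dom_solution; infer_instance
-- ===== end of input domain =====

-- B replaces A's O(n) inner summation loop by a running prefix sum over a single row
-- (O(k*n) instead of O(k*n^2)); equivalence of the return values is proved on n ≥ 0, k ≥ 1.

-- ===== PORT A =====
-- Literal port of A: a (k+1)×(n+1) matrix of rows, row 1 initialised to 1s, then for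
-- i in range(1,k+1), j in range(0,n+1), _k in range(j+1):  dp[i][j] = (dp[i][j] + dp[i-1][j-_k]) % 10^9.
-- All indices are in range under Pre_solution, so the total `getD _ _ 0` reads are exact there.
def solution (n : Int) (k : Int) : Int :=
  let N : Nat := (n + 1).toNat
  let K : Nat := (k + 1).toNat
  let dp0 : List (List Int) := List.replicate K (List.replicate N 0)
  let dp1 : List (List Int) :=
    (List.range N).foldl (fun d i => d.set 1 ((d.getD 1 []).set i 1)) dp0
  let dp2 : List (List Int) :=
    (List.range' 1 k.toNat).foldl (fun d i =>
      (List.range N).foldl (fun d j =>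
        d.set i ((d.getD i []).set j
          ((List.range (j + 1)).foldl
            (fun c m => (c + (d.getD (i - 1) []).getD (j - m) 0) % 1000000000)
            ((d.getD i []).getD j 0)))) d) dp1
  (dp2.getD k.toNat []).getD n.toNat 0

-- ===== PORT B =====
-- Literal port of B: one row [1]*(n+1); k-1 times replace it by its running prefix sums mod 10^9.
def solution_alt (n : Int) (k : Int) : Int :=
  let row0 : List Int := List.replicate (n + 1).toNat 1
  let rowK : List Int :=
    (List.range (k - 1).toNat).foldl (fun row _ =>
      (row.foldl (fun (p : Int × List Int) v =>
        ((p.1 + v) % 1000000000, p.2 ++ [(p.1 + v) % 1000000000])) ((0 : Int), ([] : List Int))).2) row0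
  rowK.getD n.toNat 0

-- ===== PRECONDITION & SPEC =====
-- A raises IndexError on every input with n < 0 or k < 1 (dp[1] or dp[k][n] is out of range);
-- Pre_solution is exactly the set of inputs on which A returns normally.
def Pre_solution (n : Int) (k : Int) : Prop := 0 ≤ n ∧ 1 ≤ k
instance (n : Int) (k : Int) : Decidable (Pre_solution n k) := by unfold Pre_solution; infer_instance
def pvWitness_solution : Int × Int := (3, 2)

def Spec_solution (n : Int) (k : Int) (out : Int) : Prop := out = solution_alt n k
instance (n : Int) (k : Int) (out : Int) : Decidable (Spec_solution n k out) := by unfold Spec_solution; infer_instance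

-- ===== CLAIM (what is proved, stated in full; the proofs are below) =====
def Claim_equal_solution : Prop := ∀ (n : Int) (k : Int), Dom_solution n k → Pre_solution n k → Spec_solution n k (solution n k)

-- ===== LEMMAS AND PROOFS =====

-- prefix-sums-mod of a row (the mathematical yardstick both ports are reduced to)
def pvPref (a : Int) : List Int → List Int
  | [] => []
  | v :: vs => (a + v) % 1000000000 :: pvPref ((a + v) % 1000000000) vs

-- pvS f m = f 0 + … + f (m-1)
def pvS (f : Nat → Int) : Nat → Int
  | 0 => 0
  | m + 1 => pvS f m + f m

-- row of the DP table after s prefix-sum steps, starting from the all-ones row of length N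
def pvRw (N : Nat) : Nat → List Int
  | 0 => List.replicate N 1
  | s + 1 => pvPref 0 (pvRw N s)

-- A's j-loop body for a fixed outer index i, acting on the whole matrix
def pvStep (N : Nat) (d : List (List Int)) (i : Nat) : List (List Int) :=
  (List.range N).foldl (fun d j =>
    d.set i ((d.getD i []).set j
      ((List.range (j + 1)).foldl
        (fun c m => (c + (d.getD (i - 1) []).getD (j - m) 0) % 1000000000)
        ((d.getD i []).getD j 0)))) d

-- A's matrix after the outer iterations i = 1..t
def pvMat (N K t : Nat) : List (List Int) :=
  (List.range' 1 t).foldl (pvStep N)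
    ((List.replicate K (List.replicate N 0)).set 1 (List.replicate N 1))

theorem pvGetD_set_self {α : Type} (l : List α) (i : Nat) (a df : α) (h : i < l.length) :
    (l.set i a).getD i df = a := by simp [List.getD, h]

theorem pvGetD_set_ne {α : Type} (l : List α) (i j : Nat) (a df : α) (h : j ≠ i) :
    (l.set i a).getD j df = l.getD j df := by
  simp [List.getD, Ne.symm h]

theorem pvGetD_replicate {α : Type} (nn i : Nat) (a df : α) (h : i < nn) :
    (List.replicate nn a).getD i df = a := by simp [List.getD, h]

theorem pvGetD_replicate_zero (nn i : Nat) : (List.replicate nn (0:Int)).getD i 0 = 0 := by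
  simp [List.getD, List.getElem?_replicate]
  split <;> rfl

theorem pvSetSelf {α : Type} (l : List α) (i : Nat) (df : α) (h : i < l.length) :
    l.set i (l.getD i df) = l := by
  rw [List.getD_eq_getElem _ _ h]; exact List.set_getElem_self h

theorem pvListExt (l1 l2 : List Int) (h1 : l1.length = l2.length)
    (h2 : ∀ j, l1.getD j 0 = l2.getD j 0) : l1 = l2 := by
  apply List.ext_getElem h1
  intro j hj hj'
  have := h2 j
  simpa [List.getD_eq_getElem, hj, hj'] using this

theorem pvSetAppend {α : Type} (l1 l2 : List α) (a : α) :
    (l1 ++ l2).set l1.length a = l1 ++ l2.set 0 a := by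
  induction l1 with
  | nil => simp
  | cons x xs ih => simp [ih]

theorem pvRange'_concat (t : Nat) : List.range' 1 (t+1) = List.range' 1 t ++ [1+t] := by
  rw [List.range'_concat]; norm_num

theorem pvS_congr (f g : Nat → Int) (m : Nat) (h : ∀ t, t < m → f t = g t) :
    pvS f m = pvS g m := by
  induction m with
  | zero => rfl
  | succ m ih => simp [pvS, ih (fun t ht => h t (by omega)), h m (by omega)]

theorem pvS_zero_fn (f : Nat → Int) (m : Nat) (h : ∀ t, f t = 0) : pvS f m = 0 := by
  induction m with
  | zero => rfl
  | succ m ih => simp [pvS, ih, h m]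

theorem pvS_shift (f : Nat → Int) (m : Nat) :
    pvS f (m+1) = f 0 + pvS (fun t => f (t+1)) m := by
  induction m with
  | zero => simp [pvS]
  | succ m ih =>
    have : pvS f (m+1+1) = pvS f (m+1) + f (m+1) := rfl
    rw [this, ih]
    have : pvS (fun t => f (t+1)) (m+1) = pvS (fun t => f (t+1)) m + f (m+1) := rfl
    rw [this]; ring

theorem pvS_reflect (f : Nat → Int) (j : Nat) :
    pvS (fun m => f (j - m)) (j+1) = pvS f (j+1) := by
  induction j generalizing f with
  | zero => simp [pvS]
  | succ j ih =>
    have h1 : pvS (fun m => f (j+1-m)) (j+1+1) = pvS (fun m => f (j+1-m)) (j+1) + f 0 := by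
      simp [pvS]
    have h2 : pvS (fun m => f (j+1-m)) (j+1) = pvS (fun m => (fun t => f (t+1)) (j-m)) (j+1) :=
      pvS_congr _ _ _ (fun t ht => by congr 1; omega)
    rw [h1, h2, ih (fun t => f (t+1)), pvS_shift f (j+1)]; ring

theorem pvFoldMod (g : Nat → Int) (mm : Nat) (c : Int) :
    (List.range (mm+1)).foldl (fun c m => (c + g m) % 1000000000) c
      = (c + pvS g (mm+1)) % 1000000000 := by
  induction mm with
  | zero => simp [List.range_succ, pvS]
  | succ mm ih =>
    rw [List.range_succ, List.foldl_append, ih]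
    simp only [List.foldl_cons, List.foldl_nil]
    rw [Int.emod_add_emod]
    congr 1
    have : pvS g (mm+1+1) = pvS g (mm+1) + g (mm+1) := rfl
    rw [this]; ring

theorem pvPref_length (a : Int) (l : List Int) : (pvPref a l).length = l.length := by
  induction l generalizing a with
  | nil => rfl
  | cons v vs ih => simp [pvPref, ih]

theorem pvRw_length (N s : Nat) : (pvRw N s).length = N := by
  induction s with
  | zero => simp [pvRw]
  | succ s ih => simp [pvRw, pvPref_length, ih]

theorem pvPref_getD (l : List Int) (a : Int) (j : Nat) (h : j < l.length) :
    (pvPref a l).getD j 0 = (a + pvS (fun t => l.getD t 0) (j+1)) % 1000000000 := by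
  induction l generalizing a j with
  | nil => simp at h
  | cons v vs ih =>
    cases j with
    | zero => simp [pvPref, pvS, List.getD]
    | succ j =>
      have hj : j < vs.length := by simpa using h
      have lhs : (pvPref a (v :: vs)).getD (j+1) 0
          = (pvPref ((a + v) % 1000000000) vs).getD j 0 := rfl
      rw [lhs, ih ((a + v) % 1000000000) j hj, Int.emod_add_emod]
      have hs : pvS (fun t => (v :: vs).getD t 0) (j+1+1)
          = v + pvS (fun t => vs.getD t 0) (j+1) := by
        rw [pvS_shift (fun t => (v :: vs).getD t 0) (j+1)]
        simp [List.getD]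
      rw [hs]; congr 1; ring

-- B's inner fold builds exactly the prefix-sums-mod row
theorem pvFoldSnd (l : List Int) (a : Int) (out : List Int) :
    (l.foldl (fun (p : Int × List Int) v =>
        ((p.1 + v) % 1000000000, p.2 ++ [(p.1 + v) % 1000000000])) (a, out)).2
      = out ++ pvPref a l := by
  induction l generalizing a out with
  | nil => simp [pvPref]
  | cons v vs ih =>
    simp only [List.foldl_cons]
    rw [ih]
    simp [pvPref]

-- B's outer fold iterates the prefix-sums-mod step
theorem pvB (N t : Nat) :
    (List.range t).foldl (fun row _ =>
        (row.foldl (fun (p : Int × List Int) v =>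
          ((p.1 + v) % 1000000000, p.2 ++ [(p.1 + v) % 1000000000])) ((0 : Int), ([] : List Int))).2)
      (List.replicate N 1) = pvRw N t := by
  induction t with
  | zero => rfl
  | succ t ih =>
    rw [List.range_succ, List.foldl_append, ih]
    simp only [List.foldl_cons, List.foldl_nil]
    rw [pvFoldSnd]
    simp [pvRw]

-- factoring A's init loop through row 1
theorem pvFoldRow1 (L : List Nat) :
    ∀ (d : List (List Int)) (r0 : List Int), 1 < d.length →
    L.foldl (fun d i => d.set 1 ((d.getD 1 []).set i 1)) (d.set 1 r0)
      = d.set 1 (L.foldl (fun r i => r.set i (1:Int)) r0) := by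
  induction L with
  | nil => intro d r0 _; rfl
  | cons x L ih =>
    intro d r0 hd
    simp only [List.foldl_cons, pvGetD_set_self _ _ _ _ hd, List.set_set]
    rw [ih d (r0.set x 1) hd]

-- factoring A's j-loop through row i (row i-1 of the ambient matrix is untouched)
theorem pvFoldRow2 (i : Nat) (hi1 : 1 ≤ i) (L : List Nat) :
    ∀ (d : List (List Int)) (r0 : List Int), i < d.length →
    L.foldl (fun d j =>
        d.set i ((d.getD i []).set j
          ((List.range (j + 1)).foldl
            (fun c m => (c + (d.getD (i - 1) []).getD (j - m) 0) % 1000000000)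
            ((d.getD i []).getD j 0)))) (d.set i r0)
      = d.set i (L.foldl (fun r j =>
          r.set j ((List.range (j + 1)).foldl
            (fun c m => (c + (d.getD (i - 1) []).getD (j - m) 0) % 1000000000)
            (r.getD j 0))) r0) := by
  induction L with
  | nil => intro d r0 _; rfl
  | cons x L ih =>
    intro d r0 hd
    have hne : i - 1 ≠ i := by omega
    simp only [List.foldl_cons, pvGetD_set_self _ _ _ _ hd, pvGetD_set_ne _ _ _ _ _ hne,
      List.set_set]
    rw [ih d _ hd]

-- the init row-loop really paints the whole row with 1s
theorem pvRowOnesAux (N : Nat) :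
    ∀ m, m ≤ N → (List.range m).foldl (fun r x => r.set x (1:Int)) (List.replicate N 0)
      = List.replicate m 1 ++ List.replicate (N - m) 0 := by
  intro m
  induction m with
  | zero => simp
  | succ m ih =>
    intro hm
    rw [List.range_succ, List.foldl_append, ih (by omega)]
    simp only [List.foldl_cons, List.foldl_nil]
    have hm' : m < N := by omega
    have hrep : List.replicate (N - m) (0:Int) = 0 :: List.replicate (N - (m+1)) 0 := by
      have : N - m = (N - (m+1)) + 1 := by omega
      rw [this, List.replicate_succ]
    rw [hrep]
    have hlen : (List.replicate m (1:Int)).length = m := by simp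
    calc (List.replicate m (1:Int) ++ (0:Int) :: List.replicate (N - (m+1)) (0:Int)).set m 1
        = (List.replicate m (1:Int) ++ (0:Int) :: List.replicate (N - (m+1)) (0:Int)).set
            (List.replicate m (1:Int)).length 1 := by rw [hlen]
      _ = List.replicate m (1:Int) ++ ((0:Int) :: List.replicate (N - (m+1)) (0:Int)).set 0 1 := by
            rw [pvSetAppend]
      _ = List.replicate (m+1) (1:Int) ++ List.replicate (N - (m+1)) (0:Int) := by
            simp [List.replicate_succ']

theorem pvRowOnes (N : Nat) :
    (List.range N).foldl (fun r x => r.set x (1:Int)) (List.replicate N 0)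
      = List.replicate N 1 := by
  have := pvRowOnesAux N N (le_refl N)
  simpa using this

-- scan of the row-level j-loop: entry j becomes (start + Σ_{t ≤ j} P t) mod 10^9
theorem pvRowScan (N : Nat) (P S0 : List Int) (hS0 : S0.length = N) :
    ∀ m, m ≤ N →
    (((List.range m).foldl (fun r j =>
        r.set j ((List.range (j + 1)).foldl
          (fun c m2 => (c + P.getD (j - m2) 0) % 1000000000)
          (r.getD j 0))) S0).length = N ∧
     ∀ j, ((List.range m).foldl (fun r j =>
        r.set j ((List.range (j + 1)).foldl
          (fun c m2 => (c + P.getD (j - m2) 0) % 1000000000)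
          (r.getD j 0))) S0).getD j 0
        = if j < m then (S0.getD j 0 + pvS (fun t => P.getD t 0) (j+1)) % 1000000000
          else S0.getD j 0) := by
  intro m
  induction m with
  | zero => exact fun _ => ⟨hS0, fun j => by simp⟩
  | succ m ih =>
    intro hm
    obtain ⟨ihl, ihd⟩ := ih (by omega)
    rw [List.range_succ, List.foldl_append]
    simp only [List.foldl_cons, List.foldl_nil]
    have hstart := ihd m
    rw [if_neg (by omega)] at hstart
    have hmlt : m < (((List.range m).foldl (fun r j =>
        r.set j ((List.range (j + 1)).foldl
          (fun c m2 => (c + P.getD (j - m2) 0) % 1000000000)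
          (r.getD j 0))) S0)).length := by rw [ihl]; omega
    constructor
    · rw [List.length_set]; exact ihl
    · intro j
      by_cases hj : j = m
      · subst hj
        rw [pvGetD_set_self _ _ _ _ hmlt, if_pos (by omega), hstart,
          pvFoldMod (fun m2 => P.getD (j - m2) 0) j (S0.getD j 0),
          pvS_reflect (fun t => P.getD t 0) j]
      · rw [pvGetD_set_ne _ _ _ _ _ hj, ihd j]
        by_cases hjm : j < m
        · rw [if_pos hjm, if_pos (by omega)]
        · rw [if_neg hjm, if_neg (by omega)]

-- the j-loop on a zero start row with previous row P computes pvPref 0 P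
theorem pvInnerRow (N : Nat) (P : List Int) (hP : P.length = N) :
    (List.range N).foldl (fun r j =>
        r.set j ((List.range (j + 1)).foldl
          (fun c m2 => (c + P.getD (j - m2) 0) % 1000000000)
          (r.getD j 0))) (List.replicate N 0)
      = pvPref 0 P := by
  obtain ⟨hl, hd⟩ := pvRowScan N P (List.replicate N 0) (by simp) N (le_refl N)
  apply pvListExt _ _ (by rw [hl, pvPref_length, hP])
  intro j
  rw [hd j]
  by_cases hj : j < N
  · rw [if_pos hj, pvGetD_replicate_zero, pvPref_getD P 0 j (by omega)]
  · rw [if_neg hj, pvGetD_replicate_zero]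
    have : (pvPref 0 P).length ≤ j := by rw [pvPref_length, hP]; omega
    rw [List.getD_eq_default _ _ this]

-- the j-loop at i = 1 (start row all 1s, previous row all 0s) leaves the row all 1s
theorem pvInnerRowOnes (N : Nat) :
    (List.range N).foldl (fun r j =>
        r.set j ((List.range (j + 1)).foldl
          (fun c m2 => (c + (List.replicate N (0:Int)).getD (j - m2) 0) % 1000000000)
          (r.getD j 0))) (List.replicate N 1)
      = List.replicate N 1 := by
  obtain ⟨hl, hd⟩ := pvRowScan N (List.replicate N 0) (List.replicate N 1) (by simp) N (le_refl N)
  apply pvListExt _ _ (by rw [hl, List.length_replicate])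
  intro j
  rw [hd j]
  have hz : pvS (fun t => (List.replicate N (0:Int)).getD t 0) (j+1) = 0 :=
    pvS_zero_fn _ _ (fun t => pvGetD_replicate_zero N t)
  by_cases hj : j < N
  · rw [if_pos hj, hz, pvGetD_replicate N j 1 0 hj]
    norm_num
  · rw [if_neg hj]

-- invariant of A's outer loop: after i = 1..t, row 1 is all 1s, rows 2..t are the
-- successive prefix-sum rows, later rows are still 0
theorem pvOuter (N K : Nat) (h2K : 2 ≤ K) :
    ∀ t, t ≤ K - 1 →
      (pvMat N K t).length = K ∧
      (pvMat N K t).getD 0 [] = List.replicate N 0 ∧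
      (pvMat N K t).getD 1 [] = List.replicate N 1 ∧
      (∀ r, 2 ≤ r → r ≤ t → (pvMat N K t).getD r [] = pvRw N (r-1)) ∧
      (∀ r, 2 ≤ r → t < r → r < K → (pvMat N K t).getD r [] = List.replicate N 0) := by
  intro t
  induction t with
  | zero =>
    intro _
    have h1K : 1 < K := by omega
    have hlen : ((List.replicate K (List.replicate N (0:Int))).set 1 (List.replicate N 1)).length = K := by simp
    refine ⟨hlen, ?_, ?_, ?_, ?_⟩
    · rw [show pvMat N K 0 = (List.replicate K (List.replicate N (0:Int))).set 1 (List.replicate N 1) from rfl]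
      rw [pvGetD_set_ne _ _ _ _ _ (by omega), pvGetD_replicate _ _ _ _ (by omega)]
    · rw [show pvMat N K 0 = (List.replicate K (List.replicate N (0:Int))).set 1 (List.replicate N 1) from rfl]
      rw [pvGetD_set_self _ _ _ _ (by simp; omega)]
    · intro r h2 h0; omega
    · intro r h2 _ hrK
      rw [show pvMat N K 0 = (List.replicate K (List.replicate N (0:Int))).set 1 (List.replicate N 1) from rfl]
      rw [pvGetD_set_ne _ _ _ _ _ (by omega), pvGetD_replicate _ _ _ _ hrK]
  | succ t ih =>
    intro ht
    obtain ⟨ihlen, ih0, ih1, ihmid, ihhigh⟩ := ih (by omega)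
    have hstep : pvMat N K (t+1) = pvStep N (pvMat N K t) (1 + t) := by
      rw [pvMat, pvRange'_concat, List.foldl_append]
      rfl
    have hiK : 1 + t < K := by omega
    have hilen : 1 + t < (pvMat N K t).length := by rw [ihlen]; omega
    by_cases ht0 : t = 0
    · -- i = 1 : the row of 1s is recomputed unchanged
      subst ht0
      have hrow : (pvMat N K 0).getD 1 [] = List.replicate N 1 := ih1
      have hP : (pvMat N K 0).getD 0 [] = List.replicate N 0 := ih0
      have hset : pvMat N K 0 = (pvMat N K 0).set 1 ((pvMat N K 0).getD 1 []) :=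
        (pvSetSelf _ _ _ (by omega)).symm
      have : pvStep N (pvMat N K 0) 1 = (pvMat N K 0).set 1
          ((List.range N).foldl (fun r j =>
            r.set j ((List.range (j + 1)).foldl
              (fun c m2 => (c + ((pvMat N K 0).getD (1 - 1) []).getD (j - m2) 0) % 1000000000)
              (r.getD j 0))) ((pvMat N K 0).getD 1 [])) := by
        rw [pvStep]
        conv_lhs => rw [hset]
        exact pvFoldRow2 1 (by omega) (List.range N) (pvMat N K 0) _ (by omega)
      rw [show (1:Nat) + 0 = 1 from rfl] at hstep
      have hsame : (pvMat N K 0).set 1 (List.replicate N 1) = pvMat N K 0 := by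
        conv_lhs => rw [← hrow]
        exact pvSetSelf _ _ _ (by omega)
      rw [hstep, this, hrow, show (1:Nat) - 1 = 0 from rfl, hP, pvInnerRowOnes N, hsame]
      exact ⟨ihlen, ih0, ih1, fun r h2 h1 => by omega, fun r h2 h1 hrK => ihhigh r h2 (by omega) hrK⟩
    · -- i = t+1 ≥ 2 : row i was all 0s, becomes pvPref 0 (row i-1) = pvRw N t
      have hge2 : 2 ≤ 1 + t := by omega
      have hrow0 : (pvMat N K t).getD (1 + t) [] = List.replicate N 0 :=
        ihhigh (1 + t) hge2 (by omega) hiK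
      have hPrev : (pvMat N K t).getD (1 + t - 1) [] = pvRw N (t - 1) := by
        have h1t : 1 + t - 1 = t := by omega
        rw [h1t]
        by_cases ht1 : t = 1
        · subst ht1; simpa using ih1
        · exact ihmid t (by omega) (le_refl t)
      have hset : pvMat N K t = (pvMat N K t).set (1 + t) ((pvMat N K t).getD (1 + t) []) :=
        (pvSetSelf _ _ _ hilen).symm
      have hfac : pvStep N (pvMat N K t) (1 + t) = (pvMat N K t).set (1 + t)
          ((List.range N).foldl (fun r j =>
            r.set j ((List.range (j + 1)).foldl
              (fun c m2 => (c + ((pvMat N K t).getD (1 + t - 1) []).getD (j - m2) 0) % 1000000000)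
              (r.getD j 0))) ((pvMat N K t).getD (1 + t) [])) := by
        rw [pvStep]
        conv_lhs => rw [hset]
        exact pvFoldRow2 (1 + t) (by omega) (List.range N) (pvMat N K t) _ hilen
      have hnew : pvStep N (pvMat N K t) (1 + t) = (pvMat N K t).set (1 + t) (pvRw N t) := by
        have ht' : pvRw N t = pvPref 0 (pvRw N (t-1)) := by
          have h : t = (t - 1) + 1 := by omega
          conv_lhs => rw [h]
          rw [pvRw]
        rw [hfac, hrow0, hPrev, pvInnerRow N (pvRw N (t-1)) (pvRw_length N (t-1)), ht']
      rw [hstep, hnew]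
      refine ⟨by simp [ihlen], ?_, ?_, ?_, ?_⟩
      · rw [pvGetD_set_ne _ _ _ _ _ (by omega)]; exact ih0
      · rw [pvGetD_set_ne _ _ _ _ _ (by omega)]; exact ih1
      · intro r h2 hr
        by_cases hri : r = 1 + t
        · subst hri
          rw [pvGetD_set_self _ _ _ _ hilen]
          congr 1; omega
        · rw [pvGetD_set_ne _ _ _ _ _ hri]
          exact ihmid r h2 (by omega)
      · intro r h2 hr hrK
        rw [pvGetD_set_ne _ _ _ _ _ (by omega)]
        exact ihhigh r h2 (by omega) hrK

-- A reduces to the (k-1)-fold prefix-sum row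
theorem pvA_eq (n k : Int) (_hn : 0 ≤ n) (hk : 1 ≤ k) :
    solution n k = (pvRw (n+1).toNat (k.toNat - 1)).getD n.toNat 0 := by
  rw [solution]
  have h2K : 2 ≤ (k+1).toNat := by omega
  have h1K : 1 < (List.replicate ((k+1).toNat) (List.replicate ((n+1).toNat) (0:Int))).length := by
    simp; omega
  have hinit : (List.range ((n+1).toNat)).foldl (fun d i => d.set 1 ((d.getD 1 []).set i 1))
        (List.replicate ((k+1).toNat) (List.replicate ((n+1).toNat) (0:Int)))
      = (List.replicate ((k+1).toNat) (List.replicate ((n+1).toNat) (0:Int))).set 1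
          (List.replicate ((n+1).toNat) 1) := by
    conv_lhs => rw [← pvSetSelf _ 1 [] h1K]
    rw [pvFoldRow1 (List.range ((n+1).toNat)) _ _ h1K,
      pvGetD_replicate _ _ _ _ (by omega), pvRowOnes]
  rw [hinit]
  have hmat : (List.range' 1 k.toNat).foldl (fun d i =>
      (List.range ((n+1).toNat)).foldl (fun d j =>
        d.set i ((d.getD i []).set j
          ((List.range (j + 1)).foldl
            (fun c m => (c + (d.getD (i - 1) []).getD (j - m) 0) % 1000000000)
            ((d.getD i []).getD j 0)))) d)
      ((List.replicate ((k+1).toNat) (List.replicate ((n+1).toNat) (0:Int))).set 1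
          (List.replicate ((n+1).toNat) 1))
      = pvMat ((n+1).toNat) ((k+1).toNat) k.toNat := rfl
  rw [hmat]
  obtain ⟨_, _, hrow1, hmid, _⟩ := pvOuter ((n+1).toNat) ((k+1).toNat) h2K k.toNat (by omega)
  by_cases hk1 : k.toNat = 1
  · rw [hk1] at hrow1 ⊢
    rw [hrow1]
    rfl
  · rw [hmid k.toNat (by omega) (le_refl _)]

-- B reduces to the same row
theorem pvB_eq (n k : Int) (_hn : 0 ≤ n) (hk : 1 ≤ k) :
    solution_alt n k = (pvRw (n+1).toNat (k.toNat - 1)).getD n.toNat 0 := by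
  rw [solution_alt]
  have hkk : (k-1).toNat = k.toNat - 1 := by omega
  rw [hkk, pvB ((n+1).toNat) (k.toNat - 1)]

-- ===== VERDICT (by name: the statement is the Claim_ definition above) =====
theorem solution_spec : Claim_equal_solution := by
  intro n k _ hpre
  obtain ⟨hn, hk⟩ := hpre
  unfold Spec_solution
  rw [pvA_eq n k hn hk, pvB_eq n k hn hk]
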